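-- pv_equiv track=rewrite | github.com/leilaerhili/qcpred | src/qcpred/features/circuit.py | _count_from_stub
-- ===== SOURCE A (Python) =====
-- from typing import Any, Dict, Optional
--
-- def _count_from_stub(stub: Dict[str, Any]) -> Dict[str, int]:
--     ops = stub.get("ops", [])
--     op_count = len(ops)
--
--     cx_count = 0
--     oneq_count = 0
--     for op in ops:
--         gate = op.get("gate")
--         if gate == "cx":
--             cx_count += 1
--         else:
--             oneq_count += 1
--
--     return {
--         "op_count": op_count,
--         "oneq_count": oneq_count,
--         "cx_count": cx_count,
--     }
-- ===== SOURCE B (Python) =====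
-- def _tally(ops):
--     # structural recursion: returns (oneq_count, cx_count) for the suffix
--     if not ops:
--         return (0, 0)
--     oneq, cx = _tally(ops[1:])
--     if ops[0].get("gate") == "cx":
--         return (oneq, cx + 1)
--     return (oneq + 1, cx)
--
-- def _count_from_stub(stub):
--     ops = stub.get("ops", [])
--     oneq_count, cx_count = _tally(ops)
--     return {
--         "op_count": oneq_count + cx_count,
--         "oneq_count": oneq_count,
--         "cx_count": cx_count,
--     }
-- ===== Notes on version B (the rewrite author's own statement) =====
-- stated objective: alternative
-- what changed: B replaces A's iterative loop (with a separate len() pass for op_count) by a structural recursion over the ops list that returns a (oneq, cx) pair, and derives op_count as oneq + cx instead of calling len.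
import Mathlib
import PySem

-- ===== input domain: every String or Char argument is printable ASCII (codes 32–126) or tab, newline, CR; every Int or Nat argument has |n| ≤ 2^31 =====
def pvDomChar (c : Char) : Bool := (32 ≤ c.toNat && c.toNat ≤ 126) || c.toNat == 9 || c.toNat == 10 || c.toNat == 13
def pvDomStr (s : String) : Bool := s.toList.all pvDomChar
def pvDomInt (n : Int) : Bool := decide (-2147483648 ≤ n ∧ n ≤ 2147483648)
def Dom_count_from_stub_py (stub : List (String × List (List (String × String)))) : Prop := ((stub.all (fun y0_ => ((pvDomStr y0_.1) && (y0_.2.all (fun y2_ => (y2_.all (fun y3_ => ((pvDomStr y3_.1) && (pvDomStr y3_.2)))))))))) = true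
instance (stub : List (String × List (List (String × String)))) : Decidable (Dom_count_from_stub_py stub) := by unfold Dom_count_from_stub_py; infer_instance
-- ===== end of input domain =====

-- B replaces A's loop+len by a structural recursion returning a (oneq, cx) pair, with op_count derived as oneq + cx (objective: alternative; not claimed faster).


-- ===== PORT A =====
def count_from_stub_py (stub : List (String × List (List (String × String)))) : List (String × Int) :=
  let ops := PySem.Dict.getD ⟨stub⟩ "ops" []
  let op_count : Int := ops.length
  let counts : Int × Int := ops.foldl (fun acc op =>
    if PySem.Dict.get? ⟨op⟩ "gate" == some "cx" then (acc.1 + 1, acc.2) else (acc.1, acc.2 + 1)) (0, 0)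
  [("op_count", op_count), ("oneq_count", counts.2), ("cx_count", counts.1)]

-- ===== PORT B =====
-- _tally: structural recursion returning (oneq_count, cx_count); ops[1:] of a nonempty list is its tail
def pvTally (ops : List (List (String × String))) : Int × Int :=
  match ops with
  | [] => (0, 0)
  | op :: rest =>
    let r := pvTally rest
    if PySem.Dict.get? ⟨op⟩ "gate" == some "cx" then (r.1, r.2 + 1) else (r.1 + 1, r.2)

def count_from_stub_py_alt (stub : List (String × List (List (String × String)))) : List (String × Int) :=
  let ops := PySem.Dict.getD ⟨stub⟩ "ops" []
  let r := pvTally ops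
  [("op_count", r.1 + r.2), ("oneq_count", r.1), ("cx_count", r.2)]

-- ===== PRECONDITION & SPEC =====
def Spec_count_from_stub_py (stub : List (String × List (List (String × String)))) (out : List (String × Int)) : Prop := out = count_from_stub_py_alt stub
instance (stub : List (String × List (List (String × String)))) (out : List (String × Int)) : Decidable (Spec_count_from_stub_py stub out) := by unfold Spec_count_from_stub_py; infer_instance

-- ===== CLAIM (what is proved, stated in full; the proofs are below) =====
def Claim_equal_count_from_stub_py : Prop := ∀ (stub : List (String × List (List (String × String)))), Dom_count_from_stub_py stub → Spec_count_from_stub_py stub (count_from_stub_py stub)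

-- ===== LEMMAS AND PROOFS =====
-- A's loop from accumulator (c, o) lands at (c + cx, o + oneq), and the list length is oneq + cx.
lemma pv_loop (ops : List (List (String × String))) (c o : Int) :
    ops.foldl (fun acc op =>
      if PySem.Dict.get? ⟨op⟩ "gate" == some "cx" then (acc.1 + 1, acc.2) else (acc.1, acc.2 + 1)) (c, o)
      = (c + (pvTally ops).2, o + (pvTally ops).1) := by
  induction ops generalizing c o with
  | nil => simp [pvTally]
  | cons h t ih =>
    simp only [List.foldl_cons]
    by_cases hp : (PySem.Dict.get? ⟨h⟩ "gate" == some "cx") = true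
    · rw [if_pos hp, ih]; simp [pvTally, hp, Prod.ext_iff]; omega
    · rw [if_neg hp, ih]; simp [pvTally, hp, Prod.ext_iff]; omega

lemma pv_len (ops : List (List (String × String))) :
    (ops.length : Int) = (pvTally ops).1 + (pvTally ops).2 := by
  induction ops with
  | nil => simp [pvTally]
  | cons h t ih =>
    by_cases hp : (PySem.Dict.get? ⟨h⟩ "gate" == some "cx") = true <;>
      simp [pvTally, hp, ih] <;> omega

-- ===== VERDICT (by name: the statement is the Claim_ definition above) =====
theorem count_from_stub_py_spec : Claim_equal_count_from_stub_py := by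
  intro stub _
  unfold Spec_count_from_stub_py count_from_stub_py count_from_stub_py_alt
  simp only [pv_loop, pv_len]
  simp
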